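-- pv_equiv track=rewrite | github.com/athenayao/advent-of-code-2022 | 2023/13/a.py | check_vertical_reflection
-- ===== SOURCE A (Python) =====
-- def check_vertical_reflection(pattern, start):
--     counter = 0
--
--     while True:
--         up = start - counter
--         down = start + counter + 1
--
--         # we assume perfect reflection means that all columns would match (except maybe one along the edge)
--         if up < 0:
--             return start + 1
--         if down > len(pattern) - 1:
--             return start + 1
--
--         if pattern[up] == pattern[down]:
--             counter += 1
--         else:
--             return -1
-- ===== SOURCE B (Python) =====
-- def check_vertical_reflection(pattern, start):
--     if start < 0:
--         return start + 1
--     above = pattern[:start + 1][::-1]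
--     below = pattern[start + 1:]
--     w = min(len(above), len(below))
--     return start + 1 if above[:w] == below[:w] else -1
-- ===== Notes on version B (the rewrite author's own statement) =====
-- stated objective: idiomatic
-- what changed: Replaced A's element-by-element while-True mirror scan (counter state, two edge guards per iteration) by the standard AoC idiom: build the reversed prefix pattern[:start+1][::-1] and the suffix pattern[start+1:], truncate both to the common width, and compare the two lists wholesale.
import Mathlib
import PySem

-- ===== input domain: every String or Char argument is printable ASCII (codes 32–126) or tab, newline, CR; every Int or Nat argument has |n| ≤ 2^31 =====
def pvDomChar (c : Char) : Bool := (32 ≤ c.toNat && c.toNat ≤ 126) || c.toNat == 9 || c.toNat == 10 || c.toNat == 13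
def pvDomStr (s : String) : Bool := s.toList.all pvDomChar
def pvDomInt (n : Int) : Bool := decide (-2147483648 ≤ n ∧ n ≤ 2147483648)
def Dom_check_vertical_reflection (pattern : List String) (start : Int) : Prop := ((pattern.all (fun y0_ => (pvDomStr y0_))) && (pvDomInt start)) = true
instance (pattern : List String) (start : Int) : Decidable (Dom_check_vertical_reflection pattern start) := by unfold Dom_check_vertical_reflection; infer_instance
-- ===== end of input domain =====

-- B replaces A's pairwise while-True scan (incrementing counter, two edge guards inside the loop)
-- by a wholesale comparison: reverse the rows above the mirror line, truncate both sides to the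
-- common width, and compare the two lists at once (objective: idiomatic).

-- ===== PORT A =====
-- the `while True` loop of A, state = counter (starts at 0, only ever incremented by 1)
def pvLoopA (pattern : List String) (start : Int) (counter : Nat) : Int :=
  let up : Int := start - counter
  let down : Int := start + counter + 1
  if _h1 : up < 0 then start + 1
  else if _h2 : down > (pattern.length : Int) - 1 then start + 1
  else if _h3 : PySem.List.pyGet? pattern up = PySem.List.pyGet? pattern down then
    pvLoopA pattern start (counter + 1)
  else -1
termination_by pattern.length - counter
decreasing_by omega

def check_vertical_reflection (pattern : List String) (start : Int) : Int :=
  pvLoopA pattern start 0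

-- ===== PORT B =====
-- `pattern[:start+1][::-1]` : [::-1] is List.reverse (PySem.List.slice?_none_none_neg_one)
def check_vertical_reflection_alt (pattern : List String) (start : Int) : Int :=
  if start < 0 then start + 1
  else
    let above := (PySem.List.slice pattern none (some (start + 1))).reverse
    let below := PySem.List.slice pattern (some (start + 1)) none
    let w : Int := min (above.length : Int) (below.length : Int)
    if PySem.List.slice above none (some w) = PySem.List.slice below none (some w)
    then start + 1 else -1

-- ===== PRECONDITION & SPEC =====
def Spec_check_vertical_reflection (pattern : List String) (start : Int) (out : Int) : Prop := out = check_vertical_reflection_alt pattern start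
instance (pattern : List String) (start : Int) (out : Int) : Decidable (Spec_check_vertical_reflection pattern start out) := by unfold Spec_check_vertical_reflection; infer_instance

-- ===== CLAIM (what is proved, stated in full; the proofs are below) =====
def Claim_equal_check_vertical_reflection : Prop := ∀ (pattern : List String) (start : Int), Dom_check_vertical_reflection pattern start → Spec_check_vertical_reflection pattern start (check_vertical_reflection pattern start)

-- ===== LEMMAS AND PROOFS =====

-- loop invariant: from state `counter` the loop decides the remaining pairs counter, counter+1, …, W-1
theorem pvLoopA_eq (pattern : List String) (start : Int) :
    ∀ (m counter : Nat), pattern.length - counter ≤ m →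
      pvLoopA pattern start counter =
        (if (PySem.List.pyRange (counter : Int) (min (start + 1) ((pattern.length : Int) - start - 1)) 1).all
              (fun c => PySem.List.pyGet? pattern (start - c) == PySem.List.pyGet? pattern (start + 1 + c))
          then start + 1 else -1) := by
  intro m
  induction m with
  | zero =>
    intro counter h
    rw [pvLoopA.eq_def]
    simp only []
    by_cases h1 : start - (counter : Int) < 0
    · rw [dif_pos h1,
        PySem.List.pyRange_one_eq_nil (by omega : min (start + 1) ((pattern.length : Int) - start - 1) ≤ (counter : Int))]
      simp
    · rw [dif_neg h1]
      by_cases h2 : start + (counter : Int) + 1 > (pattern.length : Int) - 1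
      · rw [dif_pos h2,
          PySem.List.pyRange_one_eq_nil (by omega : min (start + 1) ((pattern.length : Int) - start - 1) ≤ (counter : Int))]
        simp
      · exact absurd (by omega : start + (counter : Int) + 1 > (pattern.length : Int) - 1) h2
  | succ k ih =>
    intro counter h
    rw [pvLoopA.eq_def]
    simp only []
    by_cases h1 : start - (counter : Int) < 0
    · rw [dif_pos h1,
        PySem.List.pyRange_one_eq_nil (by omega : min (start + 1) ((pattern.length : Int) - start - 1) ≤ (counter : Int))]
      simp
    · rw [dif_neg h1]
      by_cases h2 : start + (counter : Int) + 1 > (pattern.length : Int) - 1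
      · rw [dif_pos h2,
          PySem.List.pyRange_one_eq_nil (by omega : min (start + 1) ((pattern.length : Int) - start - 1) ≤ (counter : Int))]
        simp
      · rw [dif_neg h2]
        have hc : (counter : Int) < min (start + 1) ((pattern.length : Int) - start - 1) := by omega
        rw [PySem.List.pyRange_one_cons hc, List.all_cons]
        by_cases h3 : PySem.List.pyGet? pattern (start - (counter : Int)) =
            PySem.List.pyGet? pattern (start + (counter : Int) + 1)
        · rw [dif_pos h3]
          have hhead : (PySem.List.pyGet? pattern (start - (counter : Int)) ==
              PySem.List.pyGet? pattern (start + 1 + (counter : Int))) = true := by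
            rw [beq_iff_eq, show start + 1 + (counter : Int) = start + (counter : Int) + 1 by ring]
            exact h3
          rw [hhead, Bool.true_and, ih (counter + 1) (by omega)]
          norm_num
        · rw [dif_neg h3]
          have hhead : (PySem.List.pyGet? pattern (start - (counter : Int)) ==
              PySem.List.pyGet? pattern (start + 1 + (counter : Int))) = false := by
            rw [beq_eq_false_iff_ne, show start + 1 + (counter : Int) = start + (counter : Int) + 1 by ring]
            exact h3
          rw [hhead, Bool.false_and]
          simp

-- for 0 ≤ start the two conditions agree: the truncated reversed-prefix / suffix lists are
-- equal iff every mirrored pair of rows matches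
theorem pvCond_eq (pattern : List String) (start : Int) (hs : 0 ≤ start) :
    (PySem.List.slice ((PySem.List.slice pattern none (some (start + 1))).reverse) none
        (some (min (((PySem.List.slice pattern none (some (start + 1))).reverse.length : Int))
                   ((PySem.List.slice pattern (some (start + 1)) none).length : Int)))
      = PySem.List.slice (PySem.List.slice pattern (some (start + 1)) none) none
        (some (min (((PySem.List.slice pattern none (some (start + 1))).reverse.length : Int))
                   ((PySem.List.slice pattern (some (start + 1)) none).length : Int))))
    ↔ ((PySem.List.pyRange 0 (min (start + 1) ((pattern.length : Int) - start - 1)) 1).all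
          (fun c => PySem.List.pyGet? pattern (start - c) == PySem.List.pyGet? pattern (start + 1 + c)) = true) := by
  have h1 : (0:Int) ≤ start + 1 := by omega
  rw [PySem.List.slice_to pattern h1, PySem.List.slice_from pattern h1]
  set s1 : Nat := (start + 1).toNat with hs1
  set n : Nat := pattern.length with hn
  have hcast : start + 1 = (s1 : Int) := by omega
  by_cases hle : s1 ≤ n
  · -- main case: the mirror line is inside the pattern
    have htl : (pattern.take s1).length = s1 := by rw [List.length_take, ← hn]; omega
    have hlenA : (pattern.take s1).reverse.length = s1 := by rw [List.length_reverse, htl]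
    have hlenB : (pattern.drop s1).length = n - s1 := by rw [List.length_drop, ← hn]
    rw [hlenA, hlenB]
    set wn : Nat := min s1 (n - s1) with hwn
    have hmin : min ((s1 : Int)) (((n - s1 : Nat)) : Int) = (wn : Int) := by
      rw [hwn]; push_cast; omega
    rw [hmin, PySem.List.slice_to_natCast, PySem.List.slice_to_natCast]
    have hW : min (start + 1) ((pattern.length : Int) - start - 1) = (wn : Int) := by
      rw [hwn, ← hn]; push_cast; omega
    rw [hW, PySem.List.pyRange_one, List.all_map, List.all_eq_true]
    simp only [Int.sub_zero, Int.toNat_natCast, List.mem_range, Function.comp]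
    have hidx : ∀ k : Nat, k < wn →
        ((pattern.take s1).reverse[k]? = pattern[s1 - 1 - k]? ∧
         (pattern.drop s1)[k]? = pattern[s1 + k]?) := by
      intro k hk
      have hk1 : k < s1 := by omega
      constructor
      · rw [List.getElem?_reverse (by omega : k < (pattern.take s1).length),
          htl, List.getElem?_take_of_lt (by omega : s1 - 1 - k < s1)]
      · rw [List.getElem?_drop]
    constructor
    · intro hEq k hk
      have hpair := congrArg (fun l => l[k]?) hEq
      simp only [List.getElem?_take_of_lt hk] at hpair
      rw [(hidx k hk).1, (hidx k hk).2] at hpair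
      simp only [Int.zero_add]
      rw [show start - (k : Int) = ((s1 - 1 - k : Nat) : Int) by omega,
        show start + 1 + (k : Int) = ((s1 + k : Nat) : Int) by omega,
        PySem.List.pyGet?_natCast, PySem.List.pyGet?_natCast, beq_iff_eq]
      exact hpair
    · intro hAll
      apply List.ext_getElem?
      intro i
      by_cases hi : i < wn
      · rw [List.getElem?_take_of_lt hi, List.getElem?_take_of_lt hi,
          (hidx i hi).1, (hidx i hi).2]
        have := hAll i hi
        simp only [Int.zero_add] at this
        rw [show start - (i : Int) = ((s1 - 1 - i : Nat) : Int) by omega,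
          show start + 1 + (i : Int) = ((s1 + i : Nat) : Int) by omega,
          PySem.List.pyGet?_natCast, PySem.List.pyGet?_natCast, beq_iff_eq] at this
        exact this
      · rw [List.getElem?_eq_none (by rw [List.length_take]; omega),
          List.getElem?_eq_none (by rw [List.length_take]; omega)]
  · -- start+1 is past the end of the list: both sides hold trivially
    have hdrop : pattern.drop s1 = [] := List.drop_eq_nil_of_le (by omega)
    have hnil : PySem.List.pyRange 0 (min (start + 1) ((pattern.length : Int) - start - 1)) 1 = [] :=
      PySem.List.pyRange_one_eq_nil (by omega)
    rw [hdrop, hnil]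
    have h0 : min (((pattern.take s1).reverse.length : Int)) ((([] : List String).length : Int)) = ((0 : Nat) : Int) := by
      simp only [List.length_reverse, List.length_take, List.length_nil]
      push_cast; omega
    rw [h0, PySem.List.slice_to_natCast, PySem.List.slice_to_natCast]
    simp

-- ===== VERDICT (by name: the statement is the Claim_ definition above) =====
theorem check_vertical_reflection_spec : Claim_equal_check_vertical_reflection := by
  intro pattern start _
  unfold Spec_check_vertical_reflection check_vertical_reflection check_vertical_reflection_alt
  by_cases hs : start < 0
  · rw [if_pos hs, pvLoopA.eq_def]
    simp only []
    rw [dif_pos (by simpa using hs)]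
  · rw [if_neg hs]
    rw [pvLoopA_eq pattern start pattern.length 0 (by omega)]
    simp only [Nat.cast_zero]
    rw [if_congr (pvCond_eq pattern start (by omega)).symm rfl rfl]
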